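-- pv_equiv track=rewrite | github.com/mbirky/wordle_solver | main.py | find_hightest_weighted_word
-- ===== SOURCE A (Python) =====
-- from collections import Counter
--
-- def calculate_word_weight(word, weights):
--     weight = 0
--     for c in word:
--         weight += weights[c]
--
--     # If unique characters increase weight
--     freq = Counter(word)
--     offset = 0
--     for key, value in freq.items():
--         offset += value * weights[key] - weights[key]
--     weight -= offset
--
--     return weight
--
-- def find_hightest_weighted_word(words, weights):
--     highest_weighted_word = ""
--     highest_weight = 0
--     for word in words:
--         word_weight = calculate_word_weight(word, weights)
--         if word_weight > highest_weight:
--             highest_weighted_word = word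
--             highest_weight = word_weight
--     return highest_weighted_word
-- ===== SOURCE B (Python) =====
-- def find_hightest_weighted_word(words, weights):
--     best_word = ""
--     best_weight = 0
--     for word in words:
--         word_weight = sum(weights[c] for c in set(word))
--         if word_weight > best_weight:
--             best_word, best_weight = word, word_weight
--     return best_word
-- ===== Notes on version B (the rewrite author's own statement) =====
-- stated objective: simpler
-- what changed: B replaces A's helper (total-weight pass plus a Counter pass computing a duplicate offset that is then subtracted) with a single direct sum of weights over the word's unique characters.
import Mathlib
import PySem

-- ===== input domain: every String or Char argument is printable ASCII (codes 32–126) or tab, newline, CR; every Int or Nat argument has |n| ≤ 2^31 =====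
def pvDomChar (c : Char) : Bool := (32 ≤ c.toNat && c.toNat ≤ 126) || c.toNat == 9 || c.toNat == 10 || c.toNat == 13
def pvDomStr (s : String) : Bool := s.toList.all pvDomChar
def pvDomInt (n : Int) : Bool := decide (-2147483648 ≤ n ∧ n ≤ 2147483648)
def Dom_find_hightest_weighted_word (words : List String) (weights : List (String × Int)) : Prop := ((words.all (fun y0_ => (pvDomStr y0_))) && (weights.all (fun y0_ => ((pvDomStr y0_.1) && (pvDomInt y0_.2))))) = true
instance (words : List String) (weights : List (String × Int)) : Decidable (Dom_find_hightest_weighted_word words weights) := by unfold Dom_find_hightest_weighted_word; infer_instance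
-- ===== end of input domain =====

-- B replaces A's two-pass helper (total weight minus a Counter-derived duplicate offset) by a
-- direct sum of weights over the word's unique characters; same cost, plainly shorter.

-- shared primitive: the dict lookup weights[c] (c as a one-character string key); Pre_ guarantees
-- the key exists, so the 0 default is never taken on admitted inputs.
def pvW (weights : List (String × Int)) (c : Char) : Int :=
  (PySem.Dict.mk weights).getD (String.ofList [c]) 0

-- ===== PORT A =====
def calculate_word_weight (word : String) (weights : List (String × Int)) : Int :=
  -- weight = 0; for c in word: weight += weights[c]
  let weight := word.toList.foldl (fun acc c => acc + pvW weights c) 0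
  -- freq = Counter(word)
  let freq := PySem.Dict.counter word.toList
  -- offset = 0; for key, value in freq.items(): offset += value * weights[key] - weights[key]
  let offset := freq.items.foldl (fun acc kv => acc + (kv.2 * pvW weights kv.1 - pvW weights kv.1)) 0
  weight - offset

def find_hightest_weighted_word (words : List String) (weights : List (String × Int)) : String :=
  (words.foldl (fun (st : String × Int) word =>
    let word_weight := calculate_word_weight word weights
    if word_weight > st.2 then (word, word_weight) else st) ("", 0)).1

-- ===== PORT B =====
def find_hightest_weighted_word_alt (words : List String) (weights : List (String × Int)) : String :=
  (words.foldl (fun (st : String × Int) word =>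
    let word_weight := ((PySem.Set.ofList word.toList).map (pvW weights)).sum
    if word_weight > st.2 then (word, word_weight) else st) ("", 0)).1

-- ===== PRECONDITION & SPEC =====
-- Pre_: every character of every word is a key of weights (otherwise the Python A raises KeyError).
def Pre_find_hightest_weighted_word (words : List String) (weights : List (String × Int)) : Prop :=
  (words.all (fun word => word.toList.all
    (fun c => (PySem.Dict.mk weights).contains (String.ofList [c])))) = true
instance (words : List String) (weights : List (String × Int)) : Decidable (Pre_find_hightest_weighted_word words weights) := by unfold Pre_find_hightest_weighted_word; infer_instance

def pvWitness_find_hightest_weighted_word : List String × (List (String × Int)) :=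
  (["ab", "bba"], [("a", 3), ("b", 2)])

def Spec_find_hightest_weighted_word (words : List String) (weights : List (String × Int)) (out : String) : Prop := out = find_hightest_weighted_word_alt words weights
instance (words : List String) (weights : List (String × Int)) (out : String) : Decidable (Spec_find_hightest_weighted_word words weights out) := by unfold Spec_find_hightest_weighted_word; infer_instance

-- ===== CLAIM (what is proved, stated in full; the proofs are below) =====
def Claim_equal_find_hightest_weighted_word : Prop := ∀ (words : List String) (weights : List (String × Int)), Dom_find_hightest_weighted_word words weights → Pre_find_hightest_weighted_word words weights → Spec_find_hightest_weighted_word words weights (find_hightest_weighted_word words weights)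

-- ===== LEMMAS AND PROOFS =====

theorem sum_map_sub_int (D : List Char) (g h : Char → Int) :
    (D.map (fun x => g x - h x)).sum = (D.map g).sum - (D.map h).sum := by
  induction D with
  | nil => simp
  | cons a t ih => simp only [List.map_cons, List.sum_cons, ih]; ring

-- the sum of w over a list equals the count-weighted sum over its distinct elements
theorem sum_eq_dedup_count (l : List Char) (w : Char → Int) :
    (l.map w).sum = ((PySem.Set.ofList l).map (fun k => (l.count k : Int) * w k)).sum := by
  have hnd : (PySem.Set.ofList l).Nodup := PySem.Set.nodup_ofList l
  have hF : (PySem.Set.ofList l).toFinset = l.toFinset := by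
    ext x; simp [PySem.Set.mem_ofList]
  have h1 : (l.map w).sum = ∑ m ∈ l.toFinset, (l.count m) • w m := by
    simpa using Finset.sum_multiset_map_count (l : Multiset Char) w
  rw [h1, ← hF, ← List.sum_toFinset _ hnd]
  simp

-- A's per-word weight (total minus duplicate offset) equals B's sum over unique characters.
theorem calc_eq_unique_sum (word : String) (weights : List (String × Int)) :
    calculate_word_weight word weights
      = ((PySem.Set.ofList word.toList).map (pvW weights)).sum := by
  simp only [calculate_word_weight]
  rw [PySem.Dict.items_counter, PySem.List.foldl_add, PySem.List.foldl_add,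
      sum_eq_dedup_count word.toList (pvW weights)]
  simp only [List.map_map, Function.comp_def]
  rw [sum_map_sub_int]
  ring

-- ===== VERDICT (by name: the statement is the Claim_ definition above) =====
theorem find_hightest_weighted_word_spec : Claim_equal_find_hightest_weighted_word := by
  intro words weights _ _
  unfold Spec_find_hightest_weighted_word find_hightest_weighted_word find_hightest_weighted_word_alt
  simp only [calc_eq_unique_sum]
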